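-- pv_equiv track=rewrite | github.com/Vyankatesh-Reddy/Python101 | DataTypes01.py | histogram_bin10
-- ===== SOURCE A (Python) =====
-- def histogram_bin10(lst):
--     bins = {}
--     for num in lst:
--         lower_bound = ((num - 1) // 10) * 10 + 1
--         upper_bound = lower_bound + 9
--         bin_key = f"{lower_bound}-{upper_bound}"
--         bins[bin_key] = bins.get(bin_key, 0) + 1
--     return bins
-- ===== SOURCE B (Python) =====
-- def histogram_bin10(lst):
--     def key(num):
--         lower = ((num - 1) // 10) * 10 + 1
--         return f"{lower}-{lower + 9}"
--
--     bins = {}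
--     keys = [key(n) for n in lst]
--     # partition peeling: record the first key's count, drop all its copies, repeat
--     while keys:
--         k = keys[0]
--         bins[k] = keys.count(k)
--         keys = [x for x in keys if x != k]
--     return bins
-- ===== Notes on version B (the rewrite author's own statement) =====
-- stated objective: alternative
-- what changed: Replaces the single accumulating dict-increment pass with partition peeling: map elements to bin keys, then repeatedly take the first remaining key, record its total count in one scan, and filter out all its copies before the next round.
import Mathlib
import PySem

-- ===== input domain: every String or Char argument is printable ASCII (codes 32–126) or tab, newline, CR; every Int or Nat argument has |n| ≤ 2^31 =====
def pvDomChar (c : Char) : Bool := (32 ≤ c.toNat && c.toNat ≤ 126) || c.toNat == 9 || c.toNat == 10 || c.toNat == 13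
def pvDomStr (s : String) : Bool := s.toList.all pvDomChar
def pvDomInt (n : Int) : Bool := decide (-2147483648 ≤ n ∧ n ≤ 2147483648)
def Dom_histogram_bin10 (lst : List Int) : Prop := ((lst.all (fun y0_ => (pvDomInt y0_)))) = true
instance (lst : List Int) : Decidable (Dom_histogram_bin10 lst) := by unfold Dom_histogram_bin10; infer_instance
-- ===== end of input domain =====

-- B replaces A's accumulating dict-increment pass by a partition recursion over the mapped keys.

-- ===== PORT A =====
def histogram_bin10 (lst : List Int) : List (String × Int) :=
  (lst.foldl (fun (bins : PySem.Dict String Int) num =>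
      let lower_bound := PySem.Int.floordiv (num - 1) 10 * 10 + 1
      let upper_bound := lower_bound + 9
      let bin_key := PySem.Int.toStr lower_bound ++ "-" ++ PySem.Int.toStr upper_bound
      bins.insert bin_key (bins.getD bin_key 0 + 1))
    PySem.Dict.empty).items

-- ===== PORT B =====
def binKey10_alt (num : Int) : String :=
  let lower := PySem.Int.floordiv (num - 1) 10 * 10 + 1
  PySem.Int.toStr lower ++ "-" ++ PySem.Int.toStr (lower + 9)

-- partition peeling loop, as the obvious structural recursion on the shrinking key list
def group10_alt : List String → List (String × Int)
  | [] => []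
  | k :: ks =>
      (k, ((k :: ks).count k : Int)) :: group10_alt ((k :: ks).filter (fun x => !(x == k)))
  termination_by keys => keys.length
  decreasing_by
    simp only [List.filter_cons, beq_self_eq_true, Bool.not_true, List.length_cons]
    exact Nat.lt_succ_of_le (List.length_filter_le _ _)

def histogram_bin10_alt (lst : List Int) : List (String × Int) :=
  group10_alt (lst.map binKey10_alt)

-- ===== PRECONDITION & SPEC =====
def Spec_histogram_bin10 (lst : List Int) (out : List (String × Int)) : Prop := out = histogram_bin10_alt lst
instance (lst : List Int) (out : List (String × Int)) : Decidable (Spec_histogram_bin10 lst out) := by unfold Spec_histogram_bin10; infer_instance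

-- ===== CLAIM =====
def Claim_equal_histogram_bin10 : Prop := ∀ (lst : List Int), Dom_histogram_bin10 lst → Spec_histogram_bin10 lst (histogram_bin10 lst)

-- ===== LEMMAS AND PROOFS =====

-- A's loop over lst is the counter of the mapped key list.
lemma histogram_bin10_eq_counter_items (lst : List Int) :
    histogram_bin10 lst = (PySem.Dict.counter (lst.map binKey10_alt)).items := by
  rw [← PySem.Dict.foldl_insert_getD_add_one_eq_counter, List.foldl_map]
  rfl

-- dedup commutes with filter
lemma ofList_filter (p : String → Bool) (xs : List String) :
    PySem.Set.ofList (xs.filter p) = (PySem.Set.ofList xs : List String).filter p := by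
  induction xs with
  | nil => rfl
  | cons x xs ih =>
    by_cases hp : p x = true
    · rw [List.filter_cons_of_pos hp, PySem.Set.ofList_cons, PySem.Set.ofList_cons,
        List.filter_cons_of_pos hp, ih]
      show _ = x :: List.filter _ (List.filter _ _)
      show x :: List.filter _ (List.filter _ _) = _
      rw [List.filter_filter, List.filter_filter]
      congr 1
      apply List.filter_congr
      intro a _
      exact Bool.and_comm _ _
    · rw [List.filter_cons_of_neg hp, PySem.Set.ofList_cons,
        List.filter_cons_of_neg hp, ih]
      show List.filter p _ = List.filter p (List.filter _ _)
      rw [List.filter_filter]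
      apply List.filter_congr
      intro a ha
      by_cases hax : a = x
      · subst hax; simp [hp]
      · simp [hax]

-- the partition recursion computes (dedup keys) paired with counts
lemma group10_alt_eq (keys : List String) :
    group10_alt keys
      = (PySem.Set.ofList keys : List String).map (fun k => (k, (keys.count k : Int))) := by
  induction keys using group10_alt.induct with
  | case1 => rw [group10_alt]; rfl
  | case2 k ks ih =>
    rw [group10_alt, ih, PySem.Set.ofList_cons]
    have hfil : (k :: ks).filter (fun x => !(x == k)) = ks.filter (fun x => !(x == k)) := by
      simp
    rw [hfil, ofList_filter]
    show _ = (k, ((k :: ks).count k : Int)) :: List.map _ (List.filter _ _)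
    congr 1
    apply List.map_congr_left
    intro a ha
    have hak : (a == k) = false := by
      have := List.of_mem_filter ha
      simpa using this
    have hane : a ≠ k := by
      intro h; subst h; simp at hak
    congr 1
    rw [List.count_filter (by simp [hak])]
    simp [List.count_cons]
    exact fun h => hane h.symm

-- ===== VERDICT =====
theorem histogram_bin10_spec : Claim_equal_histogram_bin10 := by
  intro lst _
  show histogram_bin10 lst = histogram_bin10_alt lst
  rw [histogram_bin10_eq_counter_items, PySem.Dict.items_counter,
    histogram_bin10_alt, group10_alt_eq]
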